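-- pv_equiv track=rewrite | github.com/miramira111/estate-tools | server.py | generate_case_number_for_date
-- ===== SOURCE A (Python) =====
-- def generate_case_number_for_date(category, year, inquiry_date, existing_customers):
--     """反響日ベースで案件番号を採番"""
--     prefix = {"sell": "S", "buy": "B", "investment": "R"}.get(category, "X")
--     year_short = str(year)[-2:] if year >= 2000 else str(year)
--
--     sorted_customers = sorted(
--         [c for c in existing_customers if c.get("inquiry_date")],
--         key=lambda c: c.get("inquiry_date") or ""
--     )
--
--     seq = 1
--     for c in sorted_customers:
--         c_date = c.get("inquiry_date") or ""
--         if c_date <= inquiry_date: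
--             seq += 1
--         else:
--             break
--
--     return f"{prefix}{year_short}{seq:04d}"
-- ===== SOURCE B (Python) =====
-- def generate_case_number_for_date(category, year, inquiry_date, existing_customers):
--     """反響日ベースで案件番号を採番 — single counting pass, no sort."""
--     prefix = {"sell": "S", "buy": "B", "investment": "R"}.get(category, "X")
--     year_short = str(year)[-2:] if year >= 2000 else str(year)
--     seq = 1
--     for c in existing_customers:
--         d = c.get("inquiry_date")
--         if d and d <= inquiry_date:
--             seq += 1
--     return f"{prefix}{year_short}{seq:04d}"
-- ===== Notes on version B (the rewrite author's own statement) =====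
-- stated objective: alternative
-- what changed: B drops the sort-then-break-loop entirely and counts, in one unsorted pass, the customers whose inquiry_date is non-empty and <= the target date.
import Mathlib
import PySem

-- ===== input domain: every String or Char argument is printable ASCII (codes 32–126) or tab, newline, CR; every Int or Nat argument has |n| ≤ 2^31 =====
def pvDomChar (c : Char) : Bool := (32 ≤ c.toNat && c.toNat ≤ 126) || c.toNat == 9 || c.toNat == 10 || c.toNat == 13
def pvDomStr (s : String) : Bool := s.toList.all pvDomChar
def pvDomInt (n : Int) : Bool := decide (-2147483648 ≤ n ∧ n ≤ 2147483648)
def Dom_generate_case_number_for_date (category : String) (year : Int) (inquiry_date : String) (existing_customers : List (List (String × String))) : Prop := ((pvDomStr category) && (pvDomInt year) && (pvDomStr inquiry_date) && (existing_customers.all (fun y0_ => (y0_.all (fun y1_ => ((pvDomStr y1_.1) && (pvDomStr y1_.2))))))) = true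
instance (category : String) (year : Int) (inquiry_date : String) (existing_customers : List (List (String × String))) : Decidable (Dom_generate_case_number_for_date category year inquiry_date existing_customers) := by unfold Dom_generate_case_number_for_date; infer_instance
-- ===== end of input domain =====

-- B replaces A's sort + break-at-first-larger loop by one unsorted counting pass; return value proved equal on all inputs.

-- ===== PORT A =====
-- c.get("inquiry_date"): first-match lookup in the customer's association list
def pvGetInq (c : List (String × String)) : Option String :=
  (PySem.Dict.mk c).get? "inquiry_date"

-- the 'for c in sorted_customers: … else: break' loop, carrying seq
def pvSeqLoopA (inquiry_date : String) : List (List (String × String)) → Int → Int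
  | [], seq => seq
  | c :: rest, seq =>
    let c_date := (pvGetInq c).getD ""
    if c_date ≤ inquiry_date then pvSeqLoopA inquiry_date rest (seq + 1) else seq

def generate_case_number_for_date (category : String) (year : Int) (inquiry_date : String) (existing_customers : List (List (String × String))) : String :=
  let prefix_ := (PySem.Dict.mk [("sell", "S"), ("buy", "B"), ("investment", "R")]).getD category "X"
  let year_short := if year ≥ 2000 then PySem.Str.slice (PySem.Int.toStr year) (some (-2)) none else PySem.Int.toStr year
  let sorted_customers := PySem.List.sorted
    (existing_customers.filter (fun c => (pvGetInq c).getD "" ≠ ""))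
    (fun c => (pvGetInq c).getD "")
  let seq := pvSeqLoopA inquiry_date sorted_customers 1
  prefix_ ++ year_short ++ PySem.Str.zfill (PySem.Int.toStr seq) 4

-- ===== PORT B =====
def generate_case_number_for_date_alt (category : String) (year : Int) (inquiry_date : String) (existing_customers : List (List (String × String))) : String :=
  let prefix_ := (PySem.Dict.mk [("sell", "S"), ("buy", "B"), ("investment", "R")]).getD category "X"
  let year_short := if year ≥ 2000 then PySem.Str.slice (PySem.Int.toStr year) (some (-2)) none else PySem.Int.toStr year
  let seq : Int := existing_customers.foldl
    (fun seq c =>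
      match pvGetInq c with
      | some d => if d ≠ "" ∧ d ≤ inquiry_date then seq + 1 else seq
      | none => seq) 1
  prefix_ ++ year_short ++ PySem.Str.zfill (PySem.Int.toStr seq) 4

-- ===== PRECONDITION & SPEC =====
def Spec_generate_case_number_for_date (category : String) (year : Int) (inquiry_date : String) (existing_customers : List (List (String × String))) (out : String) : Prop := out = generate_case_number_for_date_alt category year inquiry_date existing_customers
instance (category : String) (year : Int) (inquiry_date : String) (existing_customers : List (List (String × String))) (out : String) : Decidable (Spec_generate_case_number_for_date category year inquiry_date existing_customers out) := by unfold Spec_generate_case_number_for_date; infer_instance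

-- ===== CLAIM (what is proved, stated in full; the proofs are below) =====
def Claim_equal_generate_case_number_for_date : Prop := ∀ (category : String) (year : Int) (inquiry_date : String) (existing_customers : List (List (String × String))), Dom_generate_case_number_for_date category year inquiry_date existing_customers → Spec_generate_case_number_for_date category year inquiry_date existing_customers (generate_case_number_for_date category year inquiry_date existing_customers)

-- ===== LEMMAS AND PROOFS =====

-- A's loop over a list whose keys are pairwise ≤-ordered counts the elements with key ≤ target.
theorem pvSeqLoopA_of_pairwise (inq : String) (l : List (List (String × String))) (s : Int)
    (h : l.Pairwise (fun a b => (pvGetInq a).getD "" ≤ (pvGetInq b).getD "")) :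
    pvSeqLoopA inq l s = s + (l.countP (fun c => decide ((pvGetInq c).getD "" ≤ inq)) : Int) := by
  induction l generalizing s with
  | nil => simp [pvSeqLoopA]
  | cons c rest ih =>
    rcases List.pairwise_cons.mp h with ⟨hc, hrest⟩
    by_cases hle : (pvGetInq c).getD "" ≤ inq
    · rw [show pvSeqLoopA inq (c :: rest) s = pvSeqLoopA inq rest (s + 1) by
        simp [pvSeqLoopA, hle]]
      rw [ih (s + 1) hrest, List.countP_cons, decide_eq_true hle]
      simp
      omega
    · rw [show pvSeqLoopA inq (c :: rest) s = s by simp [pvSeqLoopA, hle]]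
      have hz : rest.countP (fun c => decide ((pvGetInq c).getD "" ≤ inq)) = 0 := by
        rw [List.countP_eq_zero]
        intro b hb
        simp only [decide_eq_true_eq]
        intro hble
        exact hle (le_trans (hc b hb) hble)
      rw [List.countP_cons, hz, decide_eq_false hle]
      simp

-- B's fold is 1 + the count of customers with non-empty inquiry_date ≤ target.
theorem pvFoldB_eq_count (inq : String) (l : List (List (String × String))) (s : Int) :
    l.foldl (fun seq c =>
      match pvGetInq c with
      | some d => if d ≠ "" ∧ d ≤ inq then seq + 1 else seq
      | none => seq) s
    = s + (l.countP (fun c => decide ((pvGetInq c).getD "" ≠ "" ∧ (pvGetInq c).getD "" ≤ inq)) : Int) := by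
  induction l generalizing s with
  | nil => simp
  | cons c rest ih =>
    rw [List.foldl_cons, ih, List.countP_cons]
    cases hg : pvGetInq c with
    | none =>
      simp only [Option.getD_none, decide_eq_true_eq]
      rw [if_neg (by simp)]
      simp
    | some d =>
      simp only [Option.getD_some, decide_eq_true_eq]
      by_cases hd : d ≠ "" ∧ d ≤ inq
      · rw [if_pos hd, if_pos hd]
        simp
        omega
      · rw [if_neg hd, if_neg hd]
        simp

-- the two sequence numbers coincide
theorem pvSeq_eq (inq : String) (xs : List (List (String × String))) :
    pvSeqLoopA inq (PySem.List.sorted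
      (xs.filter (fun c => (pvGetInq c).getD "" ≠ ""))
      (fun c => (pvGetInq c).getD "")) 1
    = xs.foldl (fun seq c =>
      match pvGetInq c with
      | some d => if d ≠ "" ∧ d ≤ inq then seq + 1 else seq
      | none => seq) 1 := by
  rw [pvSeqLoopA_of_pairwise inq _ 1
    (PySem.List.sorted_pairwise _ (fun c => (pvGetInq c).getD ""))]
  rw [pvFoldB_eq_count]
  congr 1
  rw [(PySem.List.sorted_perm (xs.filter (fun c => (pvGetInq c).getD "" ≠ ""))
        (fun c => (pvGetInq c).getD "") false).countP_eq]
  rw [List.countP_filter]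
  exact_mod_cast congrArg Nat.cast (List.countP_congr (fun c _ => by
    by_cases h1 : (pvGetInq c).getD "" ≠ "" <;> by_cases h2 : (pvGetInq c).getD "" ≤ inq <;>
      simp [h1, h2]))

-- ===== VERDICT (by name: the statement is the Claim_ definition above) =====
theorem generate_case_number_for_date_spec : Claim_equal_generate_case_number_for_date := by
  intro category year inquiry_date existing_customers _
  unfold Spec_generate_case_number_for_date
  simp only [generate_case_number_for_date, generate_case_number_for_date_alt]
  rw [pvSeq_eq]
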